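-- pv_equiv track=rewrite | github.com/oar-team/oar-docker | oardocker/commands/cmd_logs.py | split_buffer
-- ===== SOURCE A (Python) =====
-- def split_buffer(reader, separator):
--     """
--     Given a generator which yields strings and a separator string,
--     joins all input, splits on the separator and yields each chunk.
--
--     Unlike string.split(), each chunk includes the trailing
--     separator, except for the last one if none was found on the end
--     of the input.
--     """
--     buffered = str('')
--     separator = str(separator)
--
--     for data in reader:
--         buffered += data
--         while True:
--             index = buffered.find(separator)
--             if index == -1:
--                 break
--             yield buffered[:index + 1]
--             buffered = buffered[index + 1:]
--
--     if len(buffered) > 0: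
--         yield buffered
-- ===== SOURCE B (Python) =====
-- def split_buffer(reader, separator):
--     separator = str(separator)
--     s = "".join(reader)
--     start = 0
--     while True:
--         i = s.find(separator, start)
--         if i == -1:
--             break
--         yield s[start:i + 1]
--         start = i + 1
--     if start < len(s):
--         yield s[start:]
-- ===== Notes on version B (the rewrite author's own statement) =====
-- stated objective: faster
-- what changed: B joins the whole stream once and scans it with an index pointer using find(sep, start), slicing each chunk exactly once, instead of A's per-iteration re-slicing of a growing buffer (buffered[:i+1] / buffered[i+1:]) which copies the remainder on every chunk.
-- outside the precondition, e.g. on split_buffer([], ''): A returns [], B returns ['']; on split_buffer(['x'], ''): A does not finish within the time limit, B returns ['x', '']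
import Mathlib
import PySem

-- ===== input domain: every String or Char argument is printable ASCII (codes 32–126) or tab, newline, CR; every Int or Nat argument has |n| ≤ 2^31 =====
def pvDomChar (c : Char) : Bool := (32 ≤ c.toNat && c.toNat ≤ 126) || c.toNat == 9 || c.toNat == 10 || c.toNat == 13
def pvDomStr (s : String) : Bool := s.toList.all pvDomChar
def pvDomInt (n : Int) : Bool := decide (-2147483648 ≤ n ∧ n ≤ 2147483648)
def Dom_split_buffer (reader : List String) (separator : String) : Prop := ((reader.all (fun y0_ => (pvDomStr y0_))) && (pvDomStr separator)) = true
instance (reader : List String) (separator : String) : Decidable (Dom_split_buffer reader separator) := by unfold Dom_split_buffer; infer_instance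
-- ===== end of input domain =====

-- B replaces A's repeated find-and-reslice of a growing buffer by one join and a single
-- left-to-right pointer scan that slices each chunk once (objective: faster, asymptotic).

-- ===== PORT A =====
-- inner 'while True' of A: find separator in buffered, yield buffered[:index+1], keep buffered[index+1:].
-- fuel only makes the loop total (Python diverges for separator = '', excluded by Pre_); strings carried as List Char.
def pvInnerA (fuel : Nat) (sep : List Char) (buffered : List Char) (acc : List String) :
    List String × List Char :=
  match fuel with
  | 0 => (acc, buffered)
  | f + 1 =>
    let index := PySem.Chars.find buffered sep
    if index = -1 then (acc, buffered)
    else pvInnerA f sep (PySem.List.slice buffered (some (index + 1)) none)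
      (acc ++ [String.ofList (PySem.List.slice buffered none (some (index + 1)))])

def split_buffer (reader : List String) (separator : String) : List String :=
  let st := reader.foldl
    (fun (st : List String × List Char) (data : String) =>
      let buffered := st.2 ++ data.toList
      pvInnerA (buffered.length + 1) separator.toList buffered st.1)
    ([], [])
  if st.2.length > 0 then st.1 ++ [String.ofList st.2] else st.1

-- ===== PORT B =====
-- B's 'while True': i = s.find(separator, start); yield s[start:i+1]; start = i+1.
-- fuel only makes the loop total (same divergence for separator = '', excluded by Pre_).
def pvLoopB (fuel : Nat) (s sep : List Char) (start : Int) (acc : List String) :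
    List String × Int :=
  match fuel with
  | 0 => (acc, start)
  | f + 1 =>
    let i := PySem.Chars.findFrom s sep start
    if i = -1 then (acc, start)
    else pvLoopB f s sep (i + 1) (acc ++ [String.ofList (PySem.List.slice s (some start) (some (i + 1)))])

def split_buffer_alt (reader : List String) (separator : String) : List String :=
  let s := (PySem.Str.join "" reader).toList
  let r := pvLoopB (s.length + 1) s separator.toList 0 []
  if r.2 < (s.length : Int) then r.1 ++ [String.ofList (PySem.List.slice s (some r.2) none)] else r.1

-- ===== PRECONDITION & SPEC =====
-- Pre_ excludes only the empty separator: there A loops forever on any nonempty input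
-- (str.find('') is always 0 and the buffer never shrinks), and on the degenerate empty
-- reader A returns [] while B's scan naturally yields [''].
def Pre_split_buffer (reader : List String) (separator : String) : Prop := separator ≠ ""
instance (reader : List String) (separator : String) : Decidable (Pre_split_buffer reader separator) := by unfold Pre_split_buffer; infer_instance
def pvWitness_split_buffer : List String × String := (["log line\nnext", " part\n"], "\n")

def Spec_split_buffer (reader : List String) (separator : String) (out : List String) : Prop := out = split_buffer_alt reader separator
instance (reader : List String) (separator : String) (out : List String) : Decidable (Spec_split_buffer reader separator out) := by unfold Spec_split_buffer; infer_instance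

-- ===== CLAIM (what is proved, stated in full; the proofs are below) =====
def Claim_equal_split_buffer : Prop := ∀ (reader : List String) (separator : String), Dom_split_buffer reader separator → Pre_split_buffer reader separator → Spec_split_buffer reader separator (split_buffer reader separator)

-- ===== LEMMAS AND PROOFS =====

-- the joined stream, on the list-of-chars side
def pvConcat (reader : List String) : List Char := (reader.map String.toList).flatten

theorem pvJoin_toList (reader : List String) :
    (PySem.Str.join "" reader).toList = pvConcat reader := by
  rw [PySem.Str.toList_join]
  show PySem.Chars.join [] _ = _
  unfold PySem.Chars.join pvConcat
  generalize reader.map String.toList = ps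
  induction ps with
  | nil => rfl
  | cons a l ih =>
    cases l with
    | nil => simp [List.intercalate]
    | cons b m =>
      simp only [List.intercalate, List.intersperse] at *
      simp_all

-- a found occurrence lies wholly inside the string
theorem pvFind_bound {x sep : List Char} (hsep : sep ≠ [])
    (h : 0 ≤ PySem.Chars.find x sep) :
    (PySem.Chars.find x sep).toNat + sep.length ≤ x.length := by
  have hspec := (PySem.Chars.find_spec h).1
  have := hspec.length_le
  simp only [List.length_drop] at this
  have hlen : 1 ≤ sep.length := by
    cases sep with
    | nil => exact absurd rfl hsep
    | cons a l => simp
  omega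

-- first occurrence in x is the first occurrence in x ++ y
theorem pvFind_append_left {x sep : List Char} (y : List Char) (hsep : sep ≠ [])
    (h : 0 ≤ PySem.Chars.find x sep) :
    PySem.Chars.find (x ++ y) sep = PySem.Chars.find x sep := by
  have hb := pvFind_bound hsep h
  obtain ⟨h1, h2⟩ := PySem.Chars.find_spec h
  set f := (PySem.Chars.find x sep).toNat with hf
  have hfx : f ≤ x.length := by omega
  have hocc : sep <+: (x ++ y).drop f := by
    rw [List.drop_append_of_le_length hfx]
    exact h1.trans (List.prefix_append _ _)
  have hg : 0 ≤ PySem.Chars.find (x ++ y) sep := by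
    rw [PySem.Chars.find_nonneg_iff]
    exact (h1.isInfix.trans (List.drop_suffix f x).isInfix).trans (List.infix_append_left ..)
  obtain ⟨g1, g2⟩ := PySem.Chars.find_spec hg
  set g := (PySem.Chars.find (x ++ y) sep).toNat with hgdef
  have hnotlt : ¬ g < f := by
    intro hlt
    have hgx : g ≤ x.length := by omega
    rw [List.drop_append_of_le_length hgx] at g1
    have hsl : sep.length ≤ (x.drop g).length := by
      simp only [List.length_drop]; omega
    have : sep <+: x.drop g := by
      rw [List.prefix_iff_eq_take] at g1 ⊢
      rwa [List.take_append_of_le_length hsl] at g1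
    exact h2 g hlt this
  have hnotlt' : ¬ f < g := fun hlt => g2 f hlt hocc
  omega

-- no occurrence: pvInnerA stops at once (any fuel)
theorem pvInnerA_stop {sep b : List Char} (h : PySem.Chars.find b sep = -1)
    (fuel : Nat) (acc : List String) : pvInnerA fuel sep b acc = (acc, b) := by
  cases fuel with
  | zero => rfl
  | succ f => simp [pvInnerA, h]

-- with separator found, one unfolding of pvInnerA in drop/take form
theorem pvInnerA_step {sep b : List Char} {f : Int}
    (hf : PySem.Chars.find b sep = f) (h0 : 0 ≤ f) (fuel : Nat) (acc : List String) :
    pvInnerA (fuel + 1) sep b acc =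
      pvInnerA fuel sep (b.drop (f.toNat + 1)) (acc ++ [String.ofList (b.take (f.toNat + 1))]) := by
  have hne : ¬ f = -1 := by omega
  simp only [pvInnerA, hf, if_neg hne]
  have h1 : f + 1 = ((f.toNat + 1 : Nat) : Int) := by omega
  rw [h1, PySem.List.slice_from_natCast, PySem.List.slice_to_natCast]

-- fuel does not matter once it exceeds the buffer length
theorem pvInnerA_fuel {sep : List Char} (hsep : sep ≠ []) :
    ∀ f1 f2 b (acc : List String), b.length < f1 → b.length < f2 →
      pvInnerA f1 sep b acc = pvInnerA f2 sep b acc := by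
  intro f1
  induction f1 with
  | zero => intro f2 b acc h1; omega
  | succ n ih =>
    intro f2 b acc h1 h2
    by_cases hf : PySem.Chars.find b sep = -1
    · rw [pvInnerA_stop hf, pvInnerA_stop hf]
    · have h0 : 0 ≤ PySem.Chars.find b sep := by
        have := PySem.Chars.neg_one_le_find b sep; omega
      have hb := pvFind_bound hsep h0
      have hlen : 1 ≤ sep.length := by cases sep with | nil => exact absurd rfl hsep | cons a l => simp
      cases f2 with
      | zero => omega
      | succ m =>
        rw [pvInnerA_step rfl h0, pvInnerA_step rfl h0]
        apply ih
        all_goals simp only [List.length_drop]; omega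

-- the drained buffer contains no separator
theorem pvInnerA_drained {sep : List Char} (hsep : sep ≠ []) :
    ∀ fuel b (acc : List String), b.length < fuel →
      PySem.Chars.find (pvInnerA fuel sep b acc).2 sep = -1 := by
  intro fuel
  induction fuel with
  | zero => intro b acc h; omega
  | succ n ih =>
    intro b acc h
    by_cases hf : PySem.Chars.find b sep = -1
    · rw [pvInnerA_stop hf]; exact hf
    · have h0 : 0 ≤ PySem.Chars.find b sep := by
        have := PySem.Chars.neg_one_le_find b sep; omega
      have hb := pvFind_bound hsep h0
      have hlen : 1 ≤ sep.length := by cases sep with | nil => exact absurd rfl hsep | cons a l => simp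
      rw [pvInnerA_step rfl h0]
      apply ih
      simp only [List.length_drop]; omega

-- the final buffer is a suffix of the initial one
theorem pvInnerA_suffix (fuel : Nat) (sep : List Char) :
    ∀ b (acc : List String), (pvInnerA fuel sep b acc).2 <:+ b := by
  induction fuel with
  | zero => intro b acc; exact List.suffix_refl b
  | succ n ih =>
    intro b acc
    by_cases hf : PySem.Chars.find b sep = -1
    · rw [pvInnerA_stop hf]
    · have h0 : 0 ≤ PySem.Chars.find b sep := by
        have := PySem.Chars.neg_one_le_find b sep; omega
      rw [pvInnerA_step rfl h0]
      exact (ih _ _).trans (List.drop_suffix _ _)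

-- draining x ++ y = draining x, then draining (remainder ++ y)
theorem pvInnerA_split {sep : List Char} (hsep : sep ≠ []) :
    ∀ f1 x y (acc : List String) f2 f3, x.length < f1 → (x ++ y).length < f2 →
      ((pvInnerA f1 sep x acc).2 ++ y).length < f3 →
      pvInnerA f2 sep (x ++ y) acc =
        pvInnerA f3 sep ((pvInnerA f1 sep x acc).2 ++ y) (pvInnerA f1 sep x acc).1 := by
  intro f1
  induction f1 with
  | zero => intro x y acc f2 f3 h1; omega
  | succ n ih =>
    intro x y acc f2 f3 h1 h2 h3
    by_cases hf : PySem.Chars.find x sep = -1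
    · rw [pvInnerA_stop hf] at h3 ⊢
      exact pvInnerA_fuel hsep f2 f3 (x ++ y) acc h2 h3
    · have h0 : 0 ≤ PySem.Chars.find x sep := by
        have := PySem.Chars.neg_one_le_find x sep; omega
      have hb := pvFind_bound hsep h0
      have hlen : 1 ≤ sep.length := by
        cases sep with | nil => exact absurd rfl hsep | cons a l => simp
      set fN := (PySem.Chars.find x sep).toNat with hfN
      have hfx : fN + 1 ≤ x.length := by omega
      have hfx' : fN + 1 ≤ (x ++ y).length := by simp only [List.length_append]; omega
      cases f2 with
      | zero => omega
      | succ m =>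
        have hxy : PySem.Chars.find (x ++ y) sep = PySem.Chars.find x sep :=
          pvFind_append_left y hsep h0
        rw [pvInnerA_step hxy h0 m acc, pvInnerA_step rfl h0 n acc] at *
        rw [List.drop_append_of_le_length hfx, List.take_append_of_le_length hfx]
        exact ih (x.drop (fN + 1)) y _ m f3
          (by simp only [List.length_drop]; omega)
          (by simp only [List.length_append, List.length_drop] at h2 ⊢; omega) h3

-- A's fold over the reader drains the whole concatenation
theorem pvFoldA {sep : List Char} (hsep : sep ≠ []) :
    ∀ (reader : List String) (acc : List String) (b : List Char) fuel,
      PySem.Chars.find b sep = -1 → (b ++ pvConcat reader).length < fuel →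
      reader.foldl
        (fun (st : List String × List Char) (data : String) =>
          pvInnerA ((st.2 ++ data.toList).length + 1) sep (st.2 ++ data.toList) st.1) (acc, b) =
      pvInnerA fuel sep (b ++ pvConcat reader) acc := by
  intro reader
  induction reader with
  | nil =>
    intro acc b fuel hb hfuel
    simp only [List.foldl_nil, pvConcat, List.map_nil, List.flatten_nil, List.append_nil]
    exact (pvInnerA_stop hb fuel acc).symm
  | cons d rest ih =>
    intro acc b fuel hb hfuel
    have hcons : pvConcat (d :: rest) = d.toList ++ pvConcat rest := by
      simp [pvConcat]
    rw [List.foldl_cons]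
    set x := b ++ d.toList with hx
    set st1 := pvInnerA (x.length + 1) sep x acc with hst1
    have hdr : PySem.Chars.find st1.2 sep = -1 :=
      pvInnerA_drained hsep (x.length + 1) x acc (by omega)
    have hlen2 : (st1.2 ++ pvConcat rest).length < (st1.2 ++ pvConcat rest).length + 1 := by omega
    rw [ih st1.1 st1.2 ((st1.2 ++ pvConcat rest).length + 1) hdr hlen2]
    rw [hcons] at hfuel ⊢
    rw [← List.append_assoc] at hfuel ⊢
    exact (pvInnerA_split hsep (x.length + 1) x (pvConcat rest) acc fuel _
      (by omega) hfuel (by omega)).symm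

-- B's pointer loop is A's inner loop on the corresponding suffix
theorem pvLoopB_eq_innerA {s sep : List Char} (hsep : sep ≠ []) :
    ∀ fuel (k : Nat) (acc : List String), k ≤ s.length →
      pvLoopB fuel s sep (k : Int) acc =
        ((pvInnerA fuel sep (s.drop k) acc).1,
         ((s.length - (pvInnerA fuel sep (s.drop k) acc).2.length : Nat) : Int)) := by
  intro fuel
  induction fuel with
  | zero =>
    intro k acc hk
    simp only [pvLoopB, pvInnerA, List.length_drop]
    congr 1
    omega
  | succ n ih =>
    intro k acc hk
    have hff := PySem.Chars.findFrom_natCast s sep k hk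
    by_cases hf : PySem.Chars.find (s.drop k) sep = -1
    · rw [pvInnerA_stop hf]
      simp only [pvLoopB, hff, hf, reduceIte, List.length_drop]
      congr 1
      omega
    · have h0 : 0 ≤ PySem.Chars.find (s.drop k) sep := by
        have := PySem.Chars.neg_one_le_find (s.drop k) sep; omega
      have hb := pvFind_bound hsep h0
      have hlen : 1 ≤ sep.length := by
        cases sep with | nil => exact absurd rfl hsep | cons a l => simp
      set fN := (PySem.Chars.find (s.drop k) sep).toNat with hfN
      have hfval : PySem.Chars.find (s.drop k) sep = (fN : Int) := by omega
      have hi : PySem.Chars.findFrom s sep (k : Int) = ((k + fN : Nat) : Int) := by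
        rw [hff, if_neg hf, hfval]; push_cast; ring
      have hk' : k + fN + 1 ≤ s.length := by
        simp only [List.length_drop] at hb; omega
      have hine : ¬ ((k + fN : Nat) : Int) = -1 := by omega
      have h0' : (0 : Int) ≤ ((fN : Nat) : Int) := by positivity
      rw [pvInnerA_step hfval h0' n acc]
      simp only [Int.toNat_natCast]
      simp only [pvLoopB, hi, hine]
      have hcast : ((k + fN : Nat) : Int) + 1 = ((k + fN + 1 : Nat) : Int) := by push_cast; ring
      have hslice : PySem.List.slice s (some (k : Int)) (some (((k + fN : Nat) : Int) + 1)) =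
          (s.drop k).take (fN + 1) := by
        rw [hcast, PySem.List.slice_natCast]
        congr 1
        omega
      rw [hslice, hcast]
      rw [ih (k + fN + 1) _ hk']
      simp only [List.drop_drop, if_false]
      have h9 : k + (fN + 1) = k + fN + 1 := by omega
      rw [h9]

-- ===== VERDICT (by name: the statement is the Claim_ definition above) =====
theorem split_buffer_spec : Claim_equal_split_buffer := by
  intro reader separator _ hpre
  unfold Spec_split_buffer split_buffer split_buffer_alt
  dsimp only
  have hsep : separator.toList ≠ [] := by
    simpa [String.toList_eq_nil_iff] using hpre
  rw [pvJoin_toList]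
  set s := pvConcat reader with hs
  set F := s.length + 1 with hF
  have hfold := pvFoldA hsep reader [] [] F (by
      rw [PySem.Chars.find_eq_neg_one_iff]
      intro h; exact hsep (List.infix_nil.mp h)) (by simp [hF, hs])
  simp only [List.nil_append] at hfold
  rw [hfold]
  have hloop := pvLoopB_eq_innerA (s := s) hsep F 0 [] (Nat.zero_le _)
  simp only [Nat.cast_zero, List.drop_zero] at hloop
  rw [hloop]
  set r := pvInnerA F separator.toList s [] with hr
  have hsuf : r.2 <:+ s := pvInnerA_suffix F separator.toList s []
  have hlen : r.2.length ≤ s.length := hsuf.length_le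
  have hdropeq : s.drop (s.length - r.2.length) = r.2 :=
    (List.suffix_iff_eq_drop.mp hsuf).symm
  by_cases hpos : r.2.length > 0
  · rw [if_pos hpos, if_pos (by omega)]
    rw [PySem.List.slice_from_natCast, hdropeq]
  · rw [if_neg hpos, if_neg (by omega)]
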